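-- pv_equiv track=rewrite | github.com/rohansaha/GA | HW4.py | pairwiseTesting
-- ===== SOURCE A (Python) =====
-- import itertools as it
--
-- def pairwiseTesting(candSol):
--     isSame = True
--     x, y = it.tee(candSol)
--     next(y, None)
--     for i, j in zip(x, y):
--         if i == 0 and j == 0:
--             isSame = False
--             break
--     return isSame
-- ===== SOURCE B (Python) =====
-- def pairwiseTesting(candSol):
--     zeros = [i for i, v in enumerate(candSol) if v == 0]
--     for a, b in zip(zeros, zeros[1:]):
--         if b == a + 1:
--             return False
--     return True
-- ===== Notes on version B (the rewrite author's own statement) =====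
-- stated objective: alternative
-- what changed: B first builds the list of indices holding zero and then scans that index list for two consecutive indices, instead of A's tee/zip pairwise stream over the values.
import Mathlib
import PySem

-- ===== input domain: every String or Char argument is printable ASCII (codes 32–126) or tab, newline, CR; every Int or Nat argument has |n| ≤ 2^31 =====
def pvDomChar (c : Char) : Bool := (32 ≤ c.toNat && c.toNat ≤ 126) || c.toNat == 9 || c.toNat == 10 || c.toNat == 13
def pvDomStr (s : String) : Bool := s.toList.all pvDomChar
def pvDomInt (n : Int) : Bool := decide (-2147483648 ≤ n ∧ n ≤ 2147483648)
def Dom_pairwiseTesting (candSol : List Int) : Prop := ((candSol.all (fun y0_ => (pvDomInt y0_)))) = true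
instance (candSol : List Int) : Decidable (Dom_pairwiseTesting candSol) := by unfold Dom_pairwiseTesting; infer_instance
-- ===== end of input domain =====

-- B scans an index table of the zeros for consecutive indices instead of A's pairwise value stream (alternative decomposition, same cost).

-- ===== PORT A =====
-- A's 'for i, j in zip(x, y)' loop with break: zip of the list with its tail.
def pvALoop : List (Int × Int) → Bool
  | [] => true
  | (i, j) :: rest => if i == 0 && j == 0 then false else pvALoop rest

def pairwiseTesting (candSol : List Int) : Bool :=
  pvALoop (candSol.zip candSol.tail)

-- ===== PORT B =====
-- 'zeros = [i for i, v in enumerate(candSol) if v == 0]', with the running enumerate index k.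
def pvZerosFrom (k : Int) : List Int → List Int
  | [] => []
  | v :: rest => if v == 0 then k :: pvZerosFrom (k + 1) rest else pvZerosFrom (k + 1) rest

-- 'for a, b in zip(zeros, zeros[1:]): if b == a + 1: return False'
def pvBScan : List Int → Bool
  | a :: b :: rest => if b == a + 1 then false else pvBScan (b :: rest)
  | _ => true

def pairwiseTesting_alt (candSol : List Int) : Bool :=
  pvBScan (pvZerosFrom 0 candSol)

-- ===== PRECONDITION & SPEC =====
def Spec_pairwiseTesting (candSol : List Int) (out : Bool) : Prop := out = pairwiseTesting_alt candSol
instance (candSol : List Int) (out : Bool) : Decidable (Spec_pairwiseTesting candSol out) := by unfold Spec_pairwiseTesting; infer_instance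

-- ===== CLAIM (what is proved, stated in full; the proofs are below) =====
def Claim_equal_pairwiseTesting : Prop := ∀ (candSol : List Int), Dom_pairwiseTesting candSol → Spec_pairwiseTesting candSol (pairwiseTesting candSol)

-- ===== LEMMAS AND PROOFS =====

-- every index produced by pvZerosFrom k is ≥ k
theorem pvZerosFrom_ge (l : List Int) : ∀ (k m : Int), m ∈ pvZerosFrom k l → k ≤ m := by
  induction l with
  | nil => intro k m h; simp [pvZerosFrom] at h
  | cons v rest ih =>
    intro k m h
    simp only [pvZerosFrom] at h
    split at h
    · rcases List.mem_cons.mp h with h | h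
      · omega
      · have := ih (k + 1) m h; omega
    · have := ih (k + 1) m h; omega

-- main invariant: scanning the zero-index list from any start index equals A's pairwise loop
theorem pvB_eq_A (l : List Int) : ∀ (k : Int), pvBScan (pvZerosFrom k l) = pvALoop (l.zip l.tail) := by
  induction l with
  | nil => intro k; simp [pvZerosFrom, pvBScan, pvALoop]
  | cons x rest ih =>
    intro k
    cases rest with
    | nil =>
      simp only [pvZerosFrom]
      split <;> simp [pvBScan, pvALoop]
    | cons y r =>
      by_cases hx : x = 0
      · by_cases hy : y = 0
        · subst hx; subst hy
          simp [pvZerosFrom, pvBScan, pvALoop]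
        · subst hx
          have hstep : pvZerosFrom k (0 :: y :: r) = k :: pvZerosFrom (k + 2) r := by
            simp [pvZerosFrom, hy]
            ring_nf
          have hIH : pvBScan (pvZerosFrom (k + 1) (y :: r)) = pvALoop ((y :: r).zip (y :: r).tail) := ih (k + 1)
          have hz : pvZerosFrom (k + 1) (y :: r) = pvZerosFrom (k + 2) r := by
            simp [pvZerosFrom, hy]
            ring_nf
          have hskip : pvBScan (k :: pvZerosFrom (k + 2) r) = pvBScan (pvZerosFrom (k + 2) r) := by
            cases hzr : pvZerosFrom (k + 2) r with
            | nil => simp [pvBScan]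
            | cons a rest' =>
              have ha : k + 2 ≤ a := pvZerosFrom_ge r (k + 2) a (by rw [hzr]; exact List.mem_cons_self ..)
              have hne : (a == k + 1) = false := by simp; omega
              simp [pvBScan, hne]
          have hA : pvALoop ((0 :: y :: r).zip (0 :: y :: r).tail)
              = pvALoop ((y :: r).zip (y :: r).tail) := by
            have hyne : (y == 0) = false := by simp [hy]
            simp [List.zip, pvALoop, hyne]
          rw [hstep, hskip, ← hz, hIH, hA]
      · have hxne : (x == 0) = false := by simp [hx]
        have hstep : pvZerosFrom k (x :: y :: r) = pvZerosFrom (k + 1) (y :: r) := by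
          simp [pvZerosFrom, hxne]
        have hA : pvALoop ((x :: y :: r).zip (x :: y :: r).tail)
            = pvALoop ((y :: r).zip (y :: r).tail) := by
          simp [List.zip, pvALoop, hxne]
        rw [hstep, ih (k + 1), hA]

-- ===== VERDICT (by name: the statement is the Claim_ definition above) =====
theorem pairwiseTesting_spec : Claim_equal_pairwiseTesting := by
  intro candSol _
  unfold Spec_pairwiseTesting pairwiseTesting pairwiseTesting_alt
  exact (pvB_eq_A candSol 0).symm
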